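-- pv_equiv track=rewrite | github.com/anigmo97/4 | ALT/PRACTICA 1/prac1_opt.py | iterative_pract_opcional
-- ===== SOURCE A (Python) =====
-- def iterative_pract_opcional(array):
--     l= []
--     menores=[None,array[0]]
--     for i in range(1,len(array)):
--         max_freq=0
--         max_freq_index = None
--         if(array[i] > menores[-1]):
--             menores.append(array[i])
--         else:
--             for e in range(1,len(menores)):
--                 if(array[i] < menores[e] ):
--                     menores[e] = array[i]
--                     break
--
--     return menores
-- ===== SOURCE B (Python) =====
-- def iterative_pract_opcional(array):
--     tail = [array[0]]
--     for x in array[1:]: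
--         if x > tail[-1]:
--             tail.append(x)
--         else:
--             # binary search: first index pos with x < tail[pos] (tail is nondecreasing)
--             lo, hi = 0, len(tail)
--             while lo < hi:
--                 mid = (lo + hi) // 2
--                 if tail[mid] <= x:
--                     lo = mid + 1
--                 else:
--                     hi = mid
--             if lo < len(tail):
--                 tail[lo] = x
--     return [None] + tail
-- ===== Notes on version B (the rewrite author's own statement) =====
-- stated objective: faster
-- what changed: Replaces A's linear inner scan over the pile list with a hand-written binary search (bisect_right) on the nondecreasing tail list, and drops the inert leading None until the final return.
import Mathlib
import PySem

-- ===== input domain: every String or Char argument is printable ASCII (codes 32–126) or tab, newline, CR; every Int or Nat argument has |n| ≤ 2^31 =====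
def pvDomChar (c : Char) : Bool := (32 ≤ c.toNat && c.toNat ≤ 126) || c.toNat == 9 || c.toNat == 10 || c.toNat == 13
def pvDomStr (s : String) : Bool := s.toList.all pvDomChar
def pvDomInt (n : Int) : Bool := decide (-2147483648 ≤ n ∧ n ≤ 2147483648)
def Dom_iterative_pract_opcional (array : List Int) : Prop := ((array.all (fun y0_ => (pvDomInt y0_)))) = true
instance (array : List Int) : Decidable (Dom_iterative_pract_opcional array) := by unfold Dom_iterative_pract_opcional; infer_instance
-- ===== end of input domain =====

-- B replaces A's linear inner scan with a binary search on the nondecreasing tail: asymptotically faster.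

-- ===== PORT A =====
-- A keeps an inert leading None in `menores`, never read by any comparison; the port
-- carries the tail (positions after it) as `List Int` and prepends `none` at the return, which is exact.
-- A's inner loop `for e in range(1,len(menores)): if array[i] < menores[e]: menores[e]=array[i]; break`:
def pvReplaceFirst (x : Int) : List Int → List Int
  | [] => []
  | m :: rest => if x < m then x :: rest else m :: pvReplaceFirst x rest

def pvStepA (tail : List Int) (x : Int) : List Int :=
  if x > tail.getLastD 0 then tail ++ [x] else pvReplaceFirst x tail

def iterative_pract_opcional (array : List Int) : List (Option Int) :=
  match array with
  | [] => []  -- unreachable under Pre_: Python raises IndexError reading the first element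
  | a0 :: rest => none :: (rest.foldl pvStepA [a0]).map Option.some

-- ===== PORT B =====
-- Source B's hand-written bisect_right loop: first index pos in [lo,hi) with x < tail[pos]
def pvBisect (tail : List Int) (x : Int) (lo hi : Nat) : Nat :=
  if _h : lo < hi then
    let mid := (lo + hi) / 2
    if tail.getD mid 0 ≤ x then pvBisect tail x (mid + 1) hi else pvBisect tail x lo mid
  else lo
termination_by hi - lo
decreasing_by all_goals omega

def pvStepB (tail : List Int) (x : Int) : List Int :=
  if x > tail.getLastD 0 then tail ++ [x]
  else
    let pos := pvBisect tail x 0 tail.length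
    if pos < tail.length then tail.set pos x else tail

def iterative_pract_opcional_alt (array : List Int) : List (Option Int) :=
  match array with
  | [] => []  -- unreachable under Pre_
  | a0 :: rest => none :: (rest.foldl pvStepB [a0]).map Option.some

-- ===== PRECONDITION & SPEC =====
-- A reads the first element up front and raises IndexError on the empty list; Pre_ excludes exactly that.
def Pre_iterative_pract_opcional (array : List Int) : Prop := array ≠ []
instance (array : List Int) : Decidable (Pre_iterative_pract_opcional array) := by unfold Pre_iterative_pract_opcional; infer_instance
def pvWitness_iterative_pract_opcional : List Int := [3, 1, 2]

def Spec_iterative_pract_opcional (array : List Int) (out : List (Option Int)) : Prop := out = iterative_pract_opcional_alt array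
instance (array : List Int) (out : List (Option Int)) : Decidable (Spec_iterative_pract_opcional array out) := by unfold Spec_iterative_pract_opcional; infer_instance

-- ===== CLAIM (what is proved, stated in full; the proofs are below) =====
def Claim_equal_iterative_pract_opcional : Prop := ∀ (array : List Int), Dom_iterative_pract_opcional array → Pre_iterative_pract_opcional array → Spec_iterative_pract_opcional array (iterative_pract_opcional array)

-- ===== LEMMAS AND PROOFS =====

-- `pvFirstGt x l` = the index of the first element of l greater than x (l.length if none)
def pvFirstGt (x : Int) : List Int → Nat
  | [] => 0
  | m :: rest => if x < m then 0 else 1 + pvFirstGt x rest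

theorem pvFirstGt_le_length (x : Int) (l : List Int) : pvFirstGt x l ≤ l.length := by
  induction l with
  | nil => simp [pvFirstGt]
  | cons m rest ih => simp only [pvFirstGt, List.length_cons]; split <;> omega

theorem pvReplaceFirst_eq_set (x : Int) (l : List Int) :
    pvReplaceFirst x l = l.set (pvFirstGt x l) x := by
  induction l with
  | nil => simp [pvReplaceFirst, pvFirstGt]
  | cons m rest ih =>
    simp only [pvReplaceFirst, pvFirstGt]
    split
    · simp
    · simp [ih, Nat.add_comm 1 (pvFirstGt x rest)]

theorem pvFirstGt_gt (x : Int) (l : List Int) (h : pvFirstGt x l < l.length) :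
    x < l[pvFirstGt x l] := by
  induction l with
  | nil => simp at h
  | cons m rest ih =>
    by_cases hm : x < m
    · simp [pvFirstGt, hm]
    · have e : pvFirstGt x (m :: rest) = pvFirstGt x rest + 1 := by
        simp [pvFirstGt, hm, Nat.add_comm]
      have hr : pvFirstGt x rest < rest.length := by
        simp only [e, List.length_cons] at h; omega
      simp only [e, List.getElem_cons_succ]
      exact ih hr

theorem pvFirstGt_min (x : Int) (l : List Int) (i : Nat) (hi : i < l.length)
    (h : x < l[i]) : pvFirstGt x l ≤ i := by
  induction l generalizing i with
  | nil => simp at hi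
  | cons m rest ih =>
    simp only [pvFirstGt]
    split
    · omega
    · rename_i hm
      cases i with
      | zero => simp at h; omega
      | succ j =>
        have := ih j (by simpa using hi) (by simpa using h)
        omega

theorem pvSorted_get_mono (l : List Int) (hs : l.Pairwise (· ≤ ·)) (i j : Nat)
    (hij : i ≤ j) (hj : j < l.length) : l[i] ≤ l[j] := by
  rcases Nat.lt_or_ge i j with h | h
  · exact List.pairwise_iff_get.mp hs ⟨i, by omega⟩ ⟨j, hj⟩ h
  · have : i = j := by omega
    subst this; exact le_refl _

-- binary-search correctness on a sorted list
theorem pvBisect_eq_firstGt (l : List Int) (x : Int) (lo hi : Nat)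
    (hs : l.Pairwise (· ≤ ·)) (hhi : hi ≤ l.length)
    (hlo : lo ≤ pvFirstGt x l) (hhi2 : pvFirstGt x l ≤ hi) :
    pvBisect l x lo hi = pvFirstGt x l := by
  fun_induction pvBisect l x lo hi with
  | case1 lo hi h mid hle ih =>
    -- l[mid] ≤ x : firstGt > mid
    have hmeq : mid = (lo + hi) / 2 := rfl
    have hmid : mid < l.length := by omega
    refine ih hhi ?_ hhi2
    by_contra hcon
    have h1 : pvFirstGt x l ≤ mid := by omega
    have h2 : pvFirstGt x l < l.length := by omega
    have h3 := pvFirstGt_gt x l h2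
    have h4 := pvSorted_get_mono l hs _ mid h1 hmid
    rw [List.getD_eq_getElem l 0 hmid] at hle
    omega
  | case2 lo hi h mid hgt ih =>
    -- x < l[mid] : firstGt ≤ mid
    have hmeq : mid = (lo + hi) / 2 := rfl
    have hmid : mid < l.length := by omega
    refine ih (by omega) hlo ?_
    rw [List.getD_eq_getElem l 0 hmid] at hgt
    exact pvFirstGt_min x l mid hmid (by omega)
  | case3 lo hi h =>
    omega

theorem pvMem_replaceFirst (x a : Int) (l : List Int) (h : a ∈ pvReplaceFirst x l) :
    a = x ∨ a ∈ l := by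
  induction l with
  | nil => simp [pvReplaceFirst] at h
  | cons m rest ih =>
    simp only [pvReplaceFirst] at h
    split at h
    · rcases List.mem_cons.mp h with h | h
      · exact Or.inl h
      · exact Or.inr (List.mem_cons_of_mem _ h)
    · rcases List.mem_cons.mp h with h | h
      · exact Or.inr (h ▸ List.mem_cons_self)
      · rcases ih h with h | h
        · exact Or.inl h
        · exact Or.inr (List.mem_cons_of_mem _ h)

theorem pvReplaceFirst_sorted (x : Int) (l : List Int) (hs : l.Pairwise (· ≤ ·)) :
    (pvReplaceFirst x l).Pairwise (· ≤ ·) := by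
  induction l with
  | nil => simpa [pvReplaceFirst] using hs
  | cons m rest ih =>
    rcases List.pairwise_cons.mp hs with ⟨hm, hrest⟩
    simp only [pvReplaceFirst]
    split
    · rename_i hx
      exact List.pairwise_cons.mpr ⟨fun b hb => le_trans (le_of_lt hx) (hm b hb), hrest⟩
    · rename_i hx
      refine List.pairwise_cons.mpr ⟨fun b hb => ?_, ih hrest⟩
      rcases pvMem_replaceFirst x b rest hb with h | h
      · omega
      · exact hm b h
    
theorem pvMem_le_getLastD (l : List Int) (hs : l.Pairwise (· ≤ ·)) :
    ∀ a ∈ l, a ≤ l.getLastD 0 := by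
  induction l with
  | nil => intro a ha; simp at ha
  | cons m rest ih =>
    rcases List.pairwise_cons.mp hs with ⟨hm, hrest⟩
    intro a ha
    cases rest with
    | nil => simp at ha; simp [ha]  -- a = m
    | cons r rs =>
      have hgl : (m :: r :: rs).getLastD 0 = (r :: rs).getLastD 0 := by simp
      rw [hgl]
      rcases List.mem_cons.mp ha with h | h
      · subst h
        have hmem : r ∈ r :: rs := List.mem_cons_self
        exact le_trans (hm r hmem) (ih hrest r hmem)
      · exact ih hrest a h

theorem pvAppend_sorted (l : List Int) (x : Int) (hs : l.Pairwise (· ≤ ·))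
    (hx : l.getLastD 0 < x) : (l ++ [x]).Pairwise (· ≤ ·) := by
  rw [List.pairwise_append]
  exact ⟨hs, List.pairwise_singleton _ x, fun a ha b hb => by
    simp at hb; subst hb
    exact le_trans (pvMem_le_getLastD l hs a ha) (le_of_lt hx)⟩

theorem pvStepA_sorted (tail : List Int) (x : Int) (hs : tail.Pairwise (· ≤ ·)) :
    (pvStepA tail x).Pairwise (· ≤ ·) := by
  unfold pvStepA
  split
  · exact pvAppend_sorted tail x hs (by omega)
  · exact pvReplaceFirst_sorted x tail hs

theorem pvStepA_eq_stepB (tail : List Int) (x : Int) (hs : tail.Pairwise (· ≤ ·)) :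
    pvStepA tail x = pvStepB tail x := by
  unfold pvStepA pvStepB
  split
  · rfl
  · have hb := pvBisect_eq_firstGt tail x 0 tail.length hs (le_refl _)
      (Nat.zero_le _) (pvFirstGt_le_length x tail)
    rw [hb, pvReplaceFirst_eq_set]
    simp only []
    split
    · rfl
    · rename_i hpos
      have hlen : tail.length ≤ pvFirstGt x tail := by omega
      exact List.set_eq_of_length_le (a := x) hlen

theorem pvFoldl_eq (rest tail : List Int) (hs : tail.Pairwise (· ≤ ·)) :
    rest.foldl pvStepA tail = rest.foldl pvStepB tail := by
  induction rest generalizing tail with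
  | nil => rfl
  | cons x xs ih =>
    simp only [List.foldl_cons]
    rw [ih (pvStepA tail x) (pvStepA_sorted tail x hs), pvStepA_eq_stepB tail x hs]

-- ===== VERDICT (by name: the statement is the Claim_ definition above) =====
theorem iterative_pract_opcional_spec : Claim_equal_iterative_pract_opcional := by
  intro array _ hpre
  unfold Spec_iterative_pract_opcional
  match array with
  | [] => exact absurd rfl hpre
  | a0 :: rest =>
    show iterative_pract_opcional (a0 :: rest) = iterative_pract_opcional_alt (a0 :: rest)
    simp only [iterative_pract_opcional, iterative_pract_opcional_alt]
    rw [pvFoldl_eq rest [a0] (List.pairwise_singleton _ a0)]
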